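-- pv_equiv track=rewrite | github.com/chenguo/euler | py/prob8.py | product_runs
-- ===== SOURCE A (Python) =====
-- def mult(xs):
--     m = 1
--     for x in xs:
--         m *= x
--     return m
--
-- def product_runs(nums, length):
--     window = []
--     product = 1
--     for i, n in enumerate(nums):
--         if i < length:
--             window.append(n)
--         else:
--             window[i % length] = n
--         if len(window) == length:
--             yield mult(window)
-- ===== SOURCE B (Python) =====
-- def product_runs(nums, length):
--     # Incremental sliding-window product: O(n) via a running product of the
--     # window's nonzero entries plus a count of zeros in the window.
--     prod = 1
--     zeros = 0
--     for i, n in enumerate(nums):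
--         if n == 0:
--             zeros += 1
--         else:
--             prod *= n
--         if i >= length:
--             old = nums[i - length]
--             if old == 0:
--                 zeros -= 1
--             else:
--                 prod //= old
--         if i >= length - 1:
--             yield 0 if zeros else prod
-- ===== Notes on version B (the rewrite author's own statement) =====
-- stated objective: faster
-- what changed: Replaces the circular buffer whose full contents are re-multiplied for every window by an incremental sliding-window state (running product of the window's nonzero entries plus a zero count), so each step does O(1) work instead of O(length).
import Mathlib
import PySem

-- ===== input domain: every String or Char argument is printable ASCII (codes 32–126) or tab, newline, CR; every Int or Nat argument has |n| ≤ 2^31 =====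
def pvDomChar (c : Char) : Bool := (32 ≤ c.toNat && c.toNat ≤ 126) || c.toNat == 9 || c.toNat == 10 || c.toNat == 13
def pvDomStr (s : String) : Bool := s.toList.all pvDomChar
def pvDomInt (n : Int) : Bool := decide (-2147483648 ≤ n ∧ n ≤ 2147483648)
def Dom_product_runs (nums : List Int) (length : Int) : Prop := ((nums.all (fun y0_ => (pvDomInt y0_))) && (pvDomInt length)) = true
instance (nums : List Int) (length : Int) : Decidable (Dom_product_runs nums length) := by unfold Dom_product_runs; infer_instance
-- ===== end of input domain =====

-- B replaces A's per-window re-multiplication of a circular buffer by an O(1)-per-step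
-- incremental state (running product of the window's nonzero entries + zero count).

-- ===== PORT A =====
def pvMult (xs : List Int) : Int := xs.foldl (fun m x => m * x) 1

def pvLoopA (length : Int) : List Int → Nat → List Int → List Int → List Int
  | [], _, _, out => out
  | n :: rest, i, window, out =>
    let window' := if (i : Int) < length then window ++ [n]
      else PySem.List.pySetD window (PySem.Int.mod (i : Int) length) n
      -- window[i % length] = n; in range whenever Pre_ holds (0 ≤ i % length < length = len(window))
    let out' := if ((window'.length : Int) = length) then out ++ [pvMult window'] else out
    pvLoopA length rest (i + 1) window' out'

def product_runs (nums : List Int) (length : Int) : List Int :=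
  pvLoopA length nums 0 [] []

-- ===== PORT B =====
def pvLoopB (nums : List Int) (length : Int) : List Int → Nat → Int → Int → List Int → List Int
  | [], _, _, _, out => out
  | n :: rest, i, prod, zeros, out =>
    let pz := if n = 0 then (prod, zeros + 1) else (prod * n, zeros)
    let pz' := if length ≤ (i : Int) then
        -- old = nums[i - length]; in range whenever Pre_ holds (0 ≤ i - length < len(nums))
        let old := PySem.List.pyGetD nums ((i : Int) - length) 0
        if old = 0 then (pz.1, pz.2 - 1) else (PySem.Int.floordiv pz.1 old, pz.2)
      else pz
    let out' := if length - 1 ≤ (i : Int) then out ++ [if pz'.2 ≠ 0 then 0 else pz'.1] else out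
    pvLoopB nums length rest (i + 1) pz'.1 pz'.2 out'

def product_runs_alt (nums : List Int) (length : Int) : List Int :=
  pvLoopB nums length nums 0 1 0 []

-- ===== PRECONDITION & SPEC =====
-- Pre_ excludes only inputs on which consuming A's generator raises: length ≤ 0 with a
-- nonempty nums (ZeroDivisionError for length = 0, IndexError for negative length).
def Pre_product_runs (nums : List Int) (length : Int) : Prop := nums = [] ∨ 1 ≤ length
instance (nums : List Int) (length : Int) : Decidable (Pre_product_runs nums length) := by
  unfold Pre_product_runs; infer_instance
def pvWitness_product_runs : List Int × Int := ([1, 2, 3], 2)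
def Spec_product_runs (nums : List Int) (length : Int) (out : List Int) : Prop := out = product_runs_alt nums length
instance (nums : List Int) (length : Int) (out : List Int) : Decidable (Spec_product_runs nums length out) := by unfold Spec_product_runs; infer_instance

-- ===== CLAIM (what is proved, stated in full; the proofs are below) =====
def Claim_equal_product_runs : Prop := ∀ (nums : List Int) (length : Int), Dom_product_runs nums length → Pre_product_runs nums length → Spec_product_runs nums length (product_runs nums length)

-- ===== LEMMAS AND PROOFS =====

lemma pvMult_eq_prod (xs : List Int) : pvMult xs = xs.prod := by
  simp [pvMult, List.prod_eq_foldl]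
lemma prod_char (w : List Int) :
    (if (w.count 0 : Int) ≠ 0 then (0 : Int) else (w.filter (fun x => x ≠ 0)).prod) = w.prod := by
  by_cases h : (0:Int) ∈ w
  · rw [if_pos, List.prod_eq_zero h]
    have := List.count_pos_iff.mpr h
    simp; omega
  · rw [if_neg, List.filter_eq_self.mpr]
    · intro a ha; simp; rintro rfl; exact h ha
    · simp [List.count_eq_zero.mpr h]
lemma mod_two_lt {x L : Nat} (hL : 0 < L) (h : x < 2 * L) : x % L = if x < L then x else x - L := by
  split
  · exact Nat.mod_eq_of_lt ‹_›
  · have h2 : x % L = (x - L) % L := by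
      conv_lhs => rw [show x = L + (x - L) by omega]
      rw [Nat.add_mod_left]
    rw [h2, Nat.mod_eq_of_lt (by omega)]
lemma succ_mod {m L : Nat} (hL : 0 < L) : (m + 1) % L = if m % L + 1 = L then 0 else m % L + 1 := by
  have h1 : (m + 1) % L = (m % L + 1) % L := by
    conv_lhs => rw [← Nat.div_add_mod m L]
    rw [Nat.add_assoc, Nat.mul_add_mod]
  rw [h1, mod_two_lt hL (by have := Nat.mod_lt m hL; omega)]
  have := Nat.mod_lt m hL
  split <;> split <;> omega
lemma rotate_set_step (s : List Int) (L m : Nat) (hL : 1 ≤ L) (hs : s.length = L) (hm : L ≤ m) (x : Int) :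
    (s.rotate (L - m % L)).set (m % L) x = (s.tail ++ [x]).rotate (L - (m + 1) % L) := by
  have ha : m % L < L := Nat.mod_lt m (by omega)
  set a := m % L with hadef
  have hlen1 : ((s.rotate (L - a)).set a x).length = L := by simp [hs]
  have htl : (s.tail ++ [x]).length = L := by simp [hs]; omega
  apply List.ext_getElem (by simp [hs]; omega)
  intro j hj1 hj2
  rw [hlen1] at hj1
  rw [List.getElem_set, List.getElem_rotate, List.getElem_rotate]
  simp only [succ_mod (show 0 < L by omega), hs, htl]
  have key : ∀ (u : Nat) (hu : u < (s.tail ++ [x]).length),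
      (s.tail ++ [x])[u] = if h' : u < L - 1 then s[u + 1]'(by omega) else x := by
    intro u hu
    rw [List.getElem_append]
    split
    · rw [dif_pos (by simp at *; omega), List.getElem_tail]
    · rw [dif_neg (by simp at *; omega)]
      simp
  rw [key]
  simp only [← hadef]
  by_cases hc : a + 1 = L
  · simp only [if_pos hc, Nat.sub_zero, Nat.add_mod_right, Nat.mod_eq_of_lt hj1]
    by_cases hja : a = j
    · rw [if_pos hja, dif_neg (by omega)]
    · rw [if_neg hja, dif_pos (by omega)]
      have h1 : (j + (L - a)) % L = j + 1 := by
        rw [show L - a = 1 by omega, Nat.mod_eq_of_lt (by omega)]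
      simp only [h1]
  · simp only [if_neg hc]
    by_cases hja : a = j
    · have hu2 : (j + (L - (a + 1))) % L = L - 1 := by
        rw [mod_two_lt (by omega) (by omega)]
        split <;> omega
      simp only [hu2]
      rw [if_pos hja, dif_neg (by omega)]
    · have hu1 : (j + (L - a)) % L = if j < a then j + L - a else j - a := by
        rw [mod_two_lt (by omega) (by omega)]
        split <;> split <;> omega
      have hu2 : (j + (L - (a + 1))) % L = if j < a then j + L - a - 1 else j - a - 1 := by
        rw [mod_two_lt (by omega) (by omega)]
        split <;> split <;> omega
      rw [if_neg hja]
      simp only [hu1, hu2]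
      by_cases hjb : j < a
      · simp only [if_pos hjb]
        rw [dif_pos (by omega)]
        simp only [show j + L - a - 1 + 1 = j + L - a by omega]
      · simp only [if_neg hjb]
        rw [dif_pos (by omega)]
        simp only [show j - a - 1 + 1 = j - a by omega]
def pvWin (nums : List Int) (L m : Nat) : List Int := (nums.take m).drop (m - L)

lemma take_succ_eq {α} (l : List α) (m : Nat) (h : m < l.length) :
    l.take (m + 1) = l.take m ++ [l[m]] := by
  rw [List.take_succ, List.getElem?_eq_getElem h]
  rfl

lemma win_of_le (nums : List Int) (L m : Nat) (h : m ≤ L) : pvWin nums L m = nums.take m := by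
  simp [pvWin, Nat.sub_eq_zero_of_le h]

lemma win_len (nums : List Int) (L m : Nat) (h1 : L ≤ m) (h2 : m ≤ nums.length) :
    (pvWin nums L m).length = L := by
  simp [pvWin]; omega

lemma win_cons (nums : List Int) (L m : Nat) (hL : 1 ≤ L) (h1 : L ≤ m) (h2 : m ≤ nums.length) :
    pvWin nums L m = nums.getD (m - L) 0 :: (nums.take m).drop (m - L + 1) := by
  unfold pvWin
  rw [List.drop_eq_getElem_cons (by simp; omega)]
  rw [List.getElem_take, List.getD_eq_getElem nums 0 (by omega)]

lemma win_succ (nums : List Int) (L m : Nat) (hL : 1 ≤ L) (h1 : L ≤ m) (h2 : m < nums.length) :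
    pvWin nums L (m + 1) = (nums.take m).drop (m - L + 1) ++ [nums[m]] := by
  unfold pvWin
  rw [take_succ_eq nums m h2]
  rw [List.drop_append_of_le_length (by simp; omega)]
  congr 2
  omega

lemma win_succ_le (nums : List Int) (L m : Nat) (h1 : m < L) (h2 : m < nums.length) :
    pvWin nums L (m + 1) = pvWin nums L m ++ [nums[m]] := by
  rw [win_of_le _ _ _ (by omega), win_of_le _ _ _ (by omega), take_succ_eq nums m h2]

lemma floordiv_mul_cancel (h c : Int) (hh : h ≠ 0) : PySem.Int.floordiv (h * c) h = c := by
  show Int.fdiv (h * c) h = c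
  exact Int.mul_fdiv_cancel_left c hh

lemma main_loop (nums : List Int) (length : Int) (hL : 1 ≤ length) :
    ∀ (rest : List Int) (m : Nat) (window : List Int) (prod zeros : Int) (out : List Int),
      rest = nums.drop m → m ≤ nums.length →
      window = (if m < length.toNat then nums.take m
                else (pvWin nums length.toNat m).rotate (length.toNat - m % length.toNat)) →
      prod = ((pvWin nums length.toNat m).filter (fun x => x ≠ 0)).prod →
      zeros = ((pvWin nums length.toNat m).count 0 : Int) →
      pvLoopA length rest m window out = pvLoopB nums length rest m prod zeros out := by
  set L := length.toNat with hLdef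
  have hL1 : 1 ≤ L := by omega
  have hcast : (L : Int) = length := Int.toNat_of_nonneg (by omega)
  intro rest
  induction rest with
  | nil =>
    intro m window prod zeros out _ _ _ _ _
    rfl
  | cons n rest' IH =>
    intro m window prod zeros out hrest hmle hw hp hz
    have hmlt : m < nums.length := by
      by_contra hcon
      rw [List.drop_eq_nil_of_le (by omega)] at hrest
      exact List.cons_ne_nil _ _ hrest
    rw [List.drop_eq_getElem_cons hmlt] at hrest
    obtain ⟨hn, hrest'⟩ : n = nums[m] ∧ rest' = nums.drop (m + 1) := by
      injection hrest with h1 h2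
      exact ⟨h1, h2⟩
    subst hn
    simp only [pvLoopA, pvLoopB]
    by_cases hcase : m < L
    · -- still filling the buffer
      have hwm : window = nums.take m := by rw [hw, if_pos hcase]
      have hwin : pvWin nums L m = nums.take m := win_of_le _ _ _ (by omega)
      have hcondA : ((m : Nat) : Int) < length := by omega
      have hcondB : ¬ (length ≤ ((m : Nat) : Int)) := by omega
      have hcondB' : (length - 1 ≤ ((m : Nat) : Int)) ↔ (m + 1 = L) := by
        constructor <;> intro h <;> omega
      rw [if_pos hcondA, if_neg hcondB]
      have hlenw : (window ++ [nums[m]]).length = m + 1 := by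
        rw [hwm]; simp; omega
      have hcondA2 : (((window ++ [nums[m]]).length : Nat) : Int) = length ↔ (m + 1 = L) := by
        rw [hlenw]; constructor <;> intro h <;> omega
      have hwin1 : pvWin nums L (m + 1) = window ++ [nums[m]] := by
        rw [hwm, win_succ_le nums L m hcase hmlt, hwin]
      have hP : (if nums[m] = 0 then (prod, zeros + 1) else (prod * nums[m], zeros)).1
          = ((pvWin nums L (m + 1)).filter (fun x => x ≠ 0)).prod := by
        rw [hwin1, hwm, ← hwin, List.filter_append, List.prod_append, ← hp]
        by_cases h0 : nums[m] = 0 <;> simp [h0]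
      have hZ : ((if nums[m] = 0 then (prod, zeros + 1) else (prod * nums[m], zeros)).2 : Int)
          = ((pvWin nums L (m + 1)).count 0 : Int) := by
        rw [hwin1, hwm, ← hwin, List.count_append]
        push_cast
        rw [← hz]
        by_cases h0 : nums[m] = 0 <;> simp [h0]
      have hW : (window ++ [nums[m]]) = (if m + 1 < L then nums.take (m + 1)
          else (pvWin nums L (m + 1)).rotate (L - (m + 1) % L)) := by
        by_cases h2 : m + 1 < L
        · rw [if_pos h2, hwm, take_succ_eq nums m hmlt]
        · have h3 : m + 1 = L := by omega
          have hrot : (window ++ [nums[m]]).rotate L = window ++ [nums[m]] := by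
            have h4 := List.rotate_length (window ++ [nums[m]])
            rwa [hlenw, h3] at h4
          rw [if_neg h2, ← hwin1, hwin1, h3, Nat.mod_self, Nat.sub_zero, hrot]
      by_cases hc2 : m + 1 = L
      · -- first emission
        rw [if_pos (hcondA2.mpr hc2), if_pos (hcondB'.mpr hc2)]
        have hv : pvMult (window ++ [nums[m]])
            = (if (if nums[m] = 0 then (prod, zeros + 1) else (prod * nums[m], zeros)).2 ≠ 0 then (0:Int)
               else (if nums[m] = 0 then (prod, zeros + 1) else (prod * nums[m], zeros)).1) := by
          rw [pvMult_eq_prod, ← hwin1, hP, hZ, prod_char]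
        rw [hv]
        exact IH (m + 1) _ _ _ _ hrest' (by omega) hW hP hZ
      · rw [if_neg (fun h => hc2 (hcondA2.mp h)), if_neg (fun h => hc2 (hcondB'.mp h))]
        exact IH (m + 1) _ _ _ _ hrest' (by omega) hW hP hZ
    · -- buffer full: circular overwrite
      have hLm : L ≤ m := by omega
      have hcondA : ¬ (((m : Nat) : Int) < length) := by omega
      have hcondB : length ≤ ((m : Nat) : Int) := by omega
      have hcondB2 : length - 1 ≤ ((m : Nat) : Int) := by omega
      rw [if_neg hcondA, if_pos hcondB, if_pos hcondB2]
      have hwlen : (pvWin nums L m).length = L := win_len nums L m hLm (by omega)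
      have hwc := win_cons nums L m hL1 hLm (by omega)
      have hws := win_succ nums L m hL1 hLm hmlt
      -- the assignment window[m % length] = nums[m] rotates the true window forward
      have hmod : PySem.Int.mod ((m : Nat) : Int) length = ((m % L : Nat) : Int) := by
        rw [← hcast, PySem.Int.mod_natCast]
      have hset : PySem.List.pySetD window (PySem.Int.mod ((m : Nat) : Int) length) nums[m]
          = (pvWin nums L (m + 1)).rotate (L - (m + 1) % L) := by
        rw [hmod, PySem.List.pySetD_natCast, hw, if_neg hcase]
        rw [rotate_set_step (pvWin nums L m) L m hL1 hwlen hLm nums[m]]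
        rw [hwc, hws]
        rfl
      rw [hset]
      have hsetlen : ((((pvWin nums L (m + 1)).rotate (L - (m + 1) % L)).length : Nat) : Int) = length := by
        rw [List.length_rotate, win_len nums L (m + 1) (by omega) (by omega), hcast]
      rw [if_pos hsetlen]
      -- B reads the element leaving the window
      have hold : PySem.List.pyGetD nums (((m : Nat) : Int) - length) 0 = nums.getD (m - L) 0 := by
        rw [← hcast, show ((m : Nat) : Int) - ((L : Nat) : Int) = (((m - L : Nat) : Nat) : Int) by omega,
          PySem.List.pyGetD_natCast]
      rw [hold]
      set t := (nums.take m).drop (m - L + 1) with htdef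
      set hd := nums.getD (m - L) 0 with hhd
      set xv := nums[m] with hxv
      have hft : ((pvWin nums L (m + 1)).filter (fun x => x ≠ 0)).prod
          = (t.filter (fun x => x ≠ 0)).prod * (if xv = 0 then 1 else xv) := by
        rw [hws, List.filter_append]
        by_cases h0 : xv = 0 <;> simp [h0, List.filter_cons]
      have hp' : prod = (if hd = 0 then (t.filter (fun x => x ≠ 0)).prod
            else hd * (t.filter (fun x => x ≠ 0)).prod) := by
        rw [hp, hwc, List.filter_cons]
        by_cases hh : hd = 0 <;> simp [hh]
      have hz' : zeros = ((t.count 0 : Nat) : Int) + (if hd = 0 then 1 else 0) := by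
        rw [hz, hwc, List.count_cons]
        by_cases hh : hd = 0 <;> simp [hh] <;> push_cast <;> ring
      have hct : ((pvWin nums L (m + 1)).count 0 : Int)
          = ((t.count 0 : Nat) : Int) + (if xv = 0 then 1 else 0) := by
        rw [hws, List.count_append]
        by_cases h0 : xv = 0 <;> simp [h0, List.count_cons] <;> push_cast <;> ring
      have hP : (if hd = 0
            then ((if xv = 0 then (prod, zeros + 1) else (prod * xv, zeros)).1,
                  (if xv = 0 then (prod, zeros + 1) else (prod * xv, zeros)).2 - 1)
            else (PySem.Int.floordiv (if xv = 0 then (prod, zeros + 1) else (prod * xv, zeros)).1 hd,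
                  (if xv = 0 then (prod, zeros + 1) else (prod * xv, zeros)).2)).1
          = ((pvWin nums L (m + 1)).filter (fun x => x ≠ 0)).prod := by
        rw [hft, hp']
        by_cases hh : hd = 0 <;> by_cases h0 : xv = 0
        · simp [hh, h0]
        · simp [hh, h0]
        · simp [hh, h0]
          exact floordiv_mul_cancel _ _ hh
        · simp only [if_neg hh, if_neg h0]
          rw [mul_assoc, floordiv_mul_cancel _ _ hh]
      have hZ : ((if hd = 0
            then ((if xv = 0 then (prod, zeros + 1) else (prod * xv, zeros)).1,
                  (if xv = 0 then (prod, zeros + 1) else (prod * xv, zeros)).2 - 1)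
            else (PySem.Int.floordiv (if xv = 0 then (prod, zeros + 1) else (prod * xv, zeros)).1 hd,
                  (if xv = 0 then (prod, zeros + 1) else (prod * xv, zeros)).2)).2)
          = ((pvWin nums L (m + 1)).count 0 : Int) := by
        rw [hct, hz']
        by_cases hh : hd = 0 <;> by_cases h0 : xv = 0 <;> simp [hh, h0] <;> ring
      have hW : (pvWin nums L (m + 1)).rotate (L - (m + 1) % L)
          = (if m + 1 < L then nums.take (m + 1)
             else (pvWin nums L (m + 1)).rotate (L - (m + 1) % L)) := by
        rw [if_neg (by omega)]
      have hv : pvMult ((pvWin nums L (m + 1)).rotate (L - (m + 1) % L)) = (pvWin nums L (m + 1)).prod := by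
        rw [pvMult_eq_prod]
        exact (List.rotate_perm _ _).prod_eq
      rw [hv, ← prod_char (pvWin nums L (m + 1)), ← hP, ← hZ]
      exact IH (m + 1) _ _ _ _ hrest' (by omega) hW hP hZ

-- ===== VERDICT (by name: the statement is the Claim_ definition above) =====
theorem product_runs_spec : Claim_equal_product_runs := by
  intro nums length _ hpre
  unfold Spec_product_runs product_runs product_runs_alt
  rcases hpre with h | h
  · subst h; rfl
  · exact main_loop nums length h nums 0 [] 1 0 [] rfl (Nat.zero_le _)
      (by simp [show 0 < length.toNat by omega]) (by simp [pvWin]) (by simp [pvWin])
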